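-- pv_equiv track=rewrite | github.com/robinkashyap/CP-Coding | StriverSheet/MaxConsecOnes.py | maxConsecOnes
-- ===== SOURCE A (Python) =====
-- def maxConsecOnes(arr):
--     n = len(arr)
--     max,count = 0,0
--     for i in range(n):
--         if arr[i]==1:
--             count+=1
--         else:
--             if count>max:
--                 max = count
--             count = 0
--     if count>max:
--         max = count
--     return max
-- ===== SOURCE B (Python) =====
-- from itertools import groupby
--
-- def maxConsecOnes(arr):
--     return max((sum(1 for _ in g) for v, g in groupby(arr) if v == 1), default=0)
-- ===== Notes on version B (the rewrite author's own statement) =====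
-- stated objective: idiomatic
-- what changed: Replaces the explicit count/reset accumulator loop with an itertools.groupby group-then-reduce: partition into maximal runs, keep runs of ones, take the max length with default 0.
import Mathlib
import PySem

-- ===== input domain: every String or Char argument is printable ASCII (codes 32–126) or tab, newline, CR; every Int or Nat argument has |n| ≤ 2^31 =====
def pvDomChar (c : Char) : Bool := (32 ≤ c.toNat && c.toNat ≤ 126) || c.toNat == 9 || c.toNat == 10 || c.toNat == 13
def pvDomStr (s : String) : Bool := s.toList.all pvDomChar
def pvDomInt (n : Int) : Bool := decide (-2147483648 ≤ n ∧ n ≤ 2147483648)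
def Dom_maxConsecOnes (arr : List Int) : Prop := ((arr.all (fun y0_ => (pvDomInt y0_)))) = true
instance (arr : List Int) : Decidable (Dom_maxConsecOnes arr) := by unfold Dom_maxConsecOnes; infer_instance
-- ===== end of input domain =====

-- B replaces A's count/reset accumulator loop with a group-into-runs then max-of-one-run-lengths decomposition (idiomatic; same cost).


-- ===== PORT A =====
-- state is (max, count); the range(n)/arr[i] loop visits arr's elements in order, so it is a fold over arr
def maxConsecOnes (arr : List Int) : Int :=
  let st := arr.foldl
    (fun (s : Int × Int) x =>
      if x = 1 then (s.1, s.2 + 1)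
      else (if s.2 > s.1 then s.2 else s.1, (0 : Int)))
    ((0 : Int), (0 : Int))
  if st.2 > st.1 then st.2 else st.1

-- ===== PORT B =====
-- itertools.groupby(arr): the list of maximal runs, each as (value, length)
def pvRuns (arr : List Int) : List (Int × Int) :=
  match arr with
  | [] => []
  | a :: t =>
    match pvRuns t with
    | [] => [(a, 1)]
    | (v, n) :: rs => if v = a then (a, n + 1) :: rs else (a, 1) :: (v, n) :: rs

-- max(lengths of runs of ones, default=0)
def maxConsecOnes_alt (arr : List Int) : Int :=
  (((pvRuns arr).filter (fun p => p.1 = 1)).map (fun p => p.2)).foldl max 0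

-- ===== PRECONDITION & SPEC =====
def Spec_maxConsecOnes (arr : List Int) (out : Int) : Prop := out = maxConsecOnes_alt arr
instance (arr : List Int) (out : Int) : Decidable (Spec_maxConsecOnes arr out) := by unfold Spec_maxConsecOnes; infer_instance

-- ===== CLAIM (what is proved, stated in full; the proofs are below) =====
def Claim_equal_maxConsecOnes : Prop := ∀ (arr : List Int), Dom_maxConsecOnes arr → Spec_maxConsecOnes arr (maxConsecOnes arr)

-- ===== LEMMAS AND PROOFS =====

-- A's loop body and final step, named for the proofs (definitionally equal to the port's lambdas)
def pvStep (s : Int × Int) (x : Int) : Int × Int :=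
  if x = 1 then (s.1, s.2 + 1) else (if s.2 > s.1 then s.2 else s.1, (0 : Int))

def pvFin (s : Int × Int) : Int := if s.2 > s.1 then s.2 else s.1

-- reference function: (answer, length of leading run of ones)
def pvBest : List Int → Int × Int
  | [] => (0, 0)
  | a :: t =>
    if a = 1 then (max (pvBest t).1 ((pvBest t).2 + 1), (pvBest t).2 + 1)
    else ((pvBest t).1, 0)

theorem pvBest_bounds (arr : List Int) : 0 ≤ (pvBest arr).2 ∧ (pvBest arr).2 ≤ (pvBest arr).1 := by
  induction arr with
  | nil => simp [pvBest]
  | cons a t ih => simp only [pvBest]; split_ifs <;> simp <;> omega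

theorem loop_eq (arr : List Int) : ∀ m c : Int, 0 ≤ c →
    pvFin (arr.foldl pvStep (m, c)) = max m (max (c + (pvBest arr).2) (pvBest arr).1) := by
  induction arr with
  | nil =>
    intro m c hc
    simp only [List.foldl_nil, pvFin, pvBest]
    split_ifs <;> omega
  | cons a t ih =>
    intro m c hc
    have hb := pvBest_bounds t
    simp only [List.foldl_cons, pvStep, pvBest]
    by_cases h : a = 1
    · simp only [if_pos h]
      rw [ih m (c + 1) (by omega)]
      omega
    · simp only [if_neg h]
      rw [ih _ 0 le_rfl]
      split_ifs <;> omega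

-- max of the lengths of the one-runs of a run list, as B's port computes it
def pvMR (rs : List (Int × Int)) : Int :=
  ((rs.filter (fun p => p.1 = 1)).map (fun p => p.2)).foldl max 0

theorem le_foldl_max (l : List Int) : ∀ a : Int, a ≤ l.foldl max a := by
  induction l with
  | nil => intro a; simp
  | cons x t ih =>
    intro a
    simp only [List.foldl_cons]
    exact le_trans (le_max_left a x) (ih (max a x))

theorem foldl_max_shift (l : List Int) : ∀ a : Int, 0 ≤ a →
    l.foldl max a = max a (l.foldl max 0) := by
  induction l with
  | nil => intro a ha; simp; omega
  | cons x t ih =>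
    intro a ha
    have hF : (0 : Int) ≤ t.foldl max 0 := le_foldl_max t 0
    simp only [List.foldl_cons]
    rw [ih (max a x) (le_trans ha (le_max_left a x)), ih (max 0 x) (le_max_left 0 x)]
    omega

theorem pvMR_nonneg (rs : List (Int × Int)) : 0 ≤ pvMR rs := le_foldl_max _ 0

theorem pvMR_cons_one (n : Int) (rs : List (Int × Int)) (hn : 0 ≤ n) :
    pvMR ((1, n) :: rs) = max n (pvMR rs) := by
  have h := pvMR_nonneg rs
  simp only [pvMR, List.filter_cons, decide_eq_true_eq, if_true, List.map_cons,
    List.foldl_cons]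
  rw [foldl_max_shift _ (max 0 n) (le_max_left 0 n)]
  simp only [pvMR] at h ⊢
  omega

theorem pvMR_cons_ne (v n : Int) (rs : List (Int × Int)) (hv : ¬ v = 1) :
    pvMR ((v, n) :: rs) = pvMR rs := by
  simp [pvMR, hv]

theorem pvRuns_nil_iff (t : List Int) : pvRuns t = [] ↔ t = [] := by
  cases t with
  | nil => simp [pvRuns]
  | cons b t' =>
    simp only [pvRuns]
    rcases pvRuns t' with _ | ⟨⟨v, n⟩, rs⟩ <;> simp <;> split <;> simp

theorem runs_eq_best (arr : List Int) :
    pvMR (pvRuns arr) = (pvBest arr).1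
    ∧ (match pvRuns arr with
       | [] => (pvBest arr).2 = 0
       | (v, n) :: _ => (pvBest arr).2 = if v = 1 then n else 0)
    ∧ (∀ p ∈ pvRuns arr, 1 ≤ p.2) := by
  induction arr with
  | nil => simp [pvRuns, pvBest, pvMR]
  | cons a t ih =>
    obtain ⟨ih1, ih2, ih3⟩ := ih
    have hbt := pvBest_bounds t
    cases hr : pvRuns t with
    | nil =>
      have ht : t = [] := (pvRuns_nil_iff t).mp hr
      subst ht
      by_cases h1 : a = 1
      · subst h1
        refine ⟨by simp [pvMR, pvRuns, pvBest], by simp [pvRuns, pvBest], by simp [pvRuns]⟩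
      · refine ⟨?_, ?_, ?_⟩
        · simp [pvMR, pvRuns, pvBest, h1]
        · simp [pvRuns, pvBest, h1]
        · simp [pvRuns]
    | cons p rs =>
      obtain ⟨v, n⟩ := p
      rw [hr] at ih1 ih2 ih3
      simp only at ih2
      have hn : 1 ≤ n := ih3 (v, n) (List.mem_cons_self)
      have hrun : pvRuns (a :: t)
          = if v = a then (a, n + 1) :: rs else (a, 1) :: (v, n) :: rs := by
        simp [pvRuns, hr]
      by_cases hva : v = a
      · subst hva
        rw [if_pos rfl] at hrun
        by_cases h1 : v = 1
        · subst h1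
          rw [if_pos rfl] at ih2
          rw [pvMR_cons_one n rs (by omega)] at ih1
          have hmr := pvMR_nonneg rs
          refine ⟨?_, ?_, ?_⟩
          · rw [hrun, pvMR_cons_one (n + 1) rs (by omega)]
            simp [pvBest]
            omega
          · rw [hrun]
            simp [pvBest]
            omega
          · rw [hrun]
            intro p hp
            rcases List.mem_cons.mp hp with h | h
            · subst h; simp; omega
            · exact ih3 p (List.mem_cons_of_mem _ h)
        · rw [if_neg h1] at ih2
          rw [pvMR_cons_ne v n rs h1] at ih1
          refine ⟨?_, ?_, ?_⟩
          · rw [hrun, pvMR_cons_ne v (n + 1) rs h1]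
            simp [pvBest, h1]
            exact ih1
          · rw [hrun]
            simp [pvBest, h1]
          · rw [hrun]
            intro p hp
            rcases List.mem_cons.mp hp with h | h
            · subst h; simp; omega
            · exact ih3 p (List.mem_cons_of_mem _ h)
      · rw [if_neg hva] at hrun
        by_cases h1 : a = 1
        · subst h1
          have hv1 : ¬ v = 1 := hva
          rw [if_neg hv1] at ih2
          refine ⟨?_, ?_, ?_⟩
          · rw [hrun, pvMR_cons_one 1 ((v, n) :: rs) (by omega)]
            have hmr := pvMR_nonneg ((v, n) :: rs)
            simp [pvBest]
            omega
          · rw [hrun]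
            simp [pvBest]
            omega
          · rw [hrun]
            intro p hp
            rcases List.mem_cons.mp hp with h | h
            · subst h; simp
            · exact ih3 p h
        · refine ⟨?_, ?_, ?_⟩
          · rw [hrun, pvMR_cons_ne a 1 ((v, n) :: rs) h1]
            simp [pvBest, h1]
            exact ih1
          · rw [hrun]
            simp [pvBest, h1]
          · rw [hrun]
            intro p hp
            rcases List.mem_cons.mp hp with h | h
            · subst h; simp
            · exact ih3 p h

-- ===== VERDICT (by name: the statement is the Claim_ definition above) =====
theorem maxConsecOnes_spec : Claim_equal_maxConsecOnes := by
  intro arr _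
  unfold Spec_maxConsecOnes
  have hb := pvBest_bounds arr
  have hA : maxConsecOnes arr = pvFin (arr.foldl pvStep (0, 0)) := rfl
  have hB : maxConsecOnes_alt arr = pvMR (pvRuns arr) := rfl
  rw [hA, hB, loop_eq arr 0 0 le_rfl, (runs_eq_best arr).1]
  omega
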